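-- pv_equiv track=rewrite | github.com/MinRayDev/Projet-S1 | utils/shapes.py | gen_triangle
-- ===== SOURCE A (Python) =====
-- import math
--
-- def add_space(string: str) -> str:
--     """Ajoute des espaces entre tous les caractères d'un string et le retourne.
--
--     :param string: String auquel il faut ajouter des espaces.
--
--     :return: String avec des espaces.
--     :rtype: str.
--     """
--     string_to_return: str = ""
--
--     for char in string:
--         # Si le caractère n'est pas un saut de ligne on ajoute un espace
--         string_to_return += char + " " if char != "\n" else char
--
--     return string_to_return
--
-- def gen_triangle(size: int) -> str:
--     """Génère le string d'un triangle et le retourne.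
--
--     :param size: Taille du triangle.
--
--     :return: String du triangle.
--     :rtype: str.
--
--     """
--     string_to_return: str = ""
--
--     # Si le nombre est pair il y aura 2 colonnes du milieu sinon une seule.
--     offset = 2 if size % 2 == 0 else 1
--
--     # Pour toutes les lignes on va dessiner plus ou moins de 0 et de 1 en fonction de la ligne, le nombre de 1 augmente et de 0 diminue lorsque le nombre d'itérations augmente.
--     # Math.ceil(x) revient à arrondir au supérieur x.
--     for x in range(math.ceil(size / 2)):
--         string_to_return += "0" * (int(size / 2) - (x + offset - 1))
--         string_to_return += "1" * (2 * x + offset)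
--         string_to_return += "0" * (int(size / 2) - (x + offset - 1))
--         string_to_return += "\n"
--
--     return add_space(string_to_return)
-- ===== SOURCE B (Python) =====
-- import math
--
-- def gen_triangle(size: int) -> str:
--     # Build each row already spaced ("0 " / "1 " blocks), no separate respacing pass.
--     offset = 2 if size % 2 == 0 else 1
--     rows = []
--     for x in range(math.ceil(size / 2)):
--         zeros = int(size / 2) - (x + offset - 1)
--         rows.append("0 " * zeros + "1 " * (2 * x + offset) + "0 " * zeros + "\n")
--     return "".join(rows)
-- ===== Notes on version B (the rewrite author's own statement) =====
-- stated objective: simpler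
-- what changed: Drops the separate add_space respacing pass: each row is generated already spaced from '0 '/'1 ' blocks in a single loop and the rows are joined.
import Mathlib
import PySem

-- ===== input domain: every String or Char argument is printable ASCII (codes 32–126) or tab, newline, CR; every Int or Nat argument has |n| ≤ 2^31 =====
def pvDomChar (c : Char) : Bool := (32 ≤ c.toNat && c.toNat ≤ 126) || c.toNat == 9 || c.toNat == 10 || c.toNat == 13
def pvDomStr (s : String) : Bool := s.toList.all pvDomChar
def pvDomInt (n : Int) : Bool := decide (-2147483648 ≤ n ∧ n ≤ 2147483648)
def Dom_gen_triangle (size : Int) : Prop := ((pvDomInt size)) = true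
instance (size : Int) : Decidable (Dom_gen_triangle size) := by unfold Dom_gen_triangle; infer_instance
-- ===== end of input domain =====

-- B drops A's separate add_space respacing pass and emits each row already spaced in one loop (objective: simpler).

-- ===== PORT A =====
-- add_space: spaces after every non-newline character
def add_space (s : String) : String :=
  String.ofList (s.toList.foldl (fun acc c => acc ++ (if c ≠ '\n' then [c, ' '] else [c])) [])

-- math.ceil(size / 2) = -((-size) // 2); exact here since |size| ≤ 2^31 < 2^53 (float division is exact)
-- int(size / 2) truncates toward zero = Int.tdiv size 2 (same exactness remark)
def gen_triangle (size : Int) : String :=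
  let offset : Int := if PySem.Int.mod size 2 = 0 then 2 else 1
  add_space (String.ofList ((PySem.List.pyRange 0 (-(PySem.Int.floordiv (-size) 2)) 1).foldl
    (fun acc x =>
      acc ++ PySem.List.pyRepeat ['0'] (Int.tdiv size 2 - (x + offset - 1))
          ++ PySem.List.pyRepeat ['1'] (2 * x + offset)
          ++ PySem.List.pyRepeat ['0'] (Int.tdiv size 2 - (x + offset - 1))
          ++ ['\n']) []))

-- ===== PORT B =====
def gen_triangle_alt (size : Int) : String :=
  let offset : Int := if PySem.Int.mod size 2 = 0 then 2 else 1
  let rows := (PySem.List.pyRange 0 (-(PySem.Int.floordiv (-size) 2)) 1).map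
    (fun x =>
      let zeros := Int.tdiv size 2 - (x + offset - 1)
      PySem.List.pyRepeat ['0', ' '] zeros
        ++ PySem.List.pyRepeat ['1', ' '] (2 * x + offset)
        ++ PySem.List.pyRepeat ['0', ' '] zeros
        ++ ['\n'])
  String.ofList rows.flatten

-- ===== PRECONDITION & SPEC =====
def Spec_gen_triangle (size : Int) (out : String) : Prop := out = gen_triangle_alt size
instance (size : Int) (out : String) : Decidable (Spec_gen_triangle size out) := by unfold Spec_gen_triangle; infer_instance

-- ===== CLAIM (what is proved, stated in full; the proofs are below) =====
def Claim_equal_gen_triangle : Prop := ∀ (size : Int), Dom_gen_triangle size → Spec_gen_triangle size (gen_triangle size)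

-- ===== LEMMAS AND PROOFS =====

-- the per-character spacing map that add_space performs
def spc (c : Char) : List Char := if c ≠ '\n' then [c, ' '] else [c]

theorem add_space_eq_flatMap (s : String) :
    add_space s = String.ofList (s.toList.flatMap spc) := by
  unfold add_space
  rw [PySem.List.foldl_append_eq_flatMap]
  rfl

theorem flatMap_pyRepeat (f : Char → List Char) (a : Char) (n : Int) :
    (PySem.List.pyRepeat [a] n).flatMap f = (List.replicate n.toNat (f a)).flatten := by
  rw [PySem.List.pyRepeat_singleton]
  induction n.toNat with
  | zero => simp
  | succ k ih => simp [List.replicate_succ, ih]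

theorem pyRepeat_pair_eq (a b : Char) (n : Int) :
    PySem.List.pyRepeat [a, b] n = (List.replicate n.toNat [a, b]).flatten := by
  unfold PySem.List.pyRepeat
  induction n.toNat with
  | zero => simp
  | succ k _ => simp [List.replicate_succ]

theorem spc_row (z o : Int) :
    (PySem.List.pyRepeat ['0'] z ++ PySem.List.pyRepeat ['1'] o
      ++ PySem.List.pyRepeat ['0'] z ++ ['\n']).flatMap spc
    = PySem.List.pyRepeat ['0', ' '] z ++ PySem.List.pyRepeat ['1', ' '] o
      ++ PySem.List.pyRepeat ['0', ' '] z ++ ['\n'] := by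
  simp only [List.flatMap_append, flatMap_pyRepeat, pyRepeat_pair_eq]
  simp [spc]

theorem gen_triangle_spec : Claim_equal_gen_triangle := by
  intro size _
  unfold Spec_gen_triangle gen_triangle gen_triangle_alt
  rw [add_space_eq_flatMap, String.ofList_inj, String.toList_ofList]
  have hb : (fun (acc : List Char) x =>
        acc ++ PySem.List.pyRepeat ['0'] (Int.tdiv size 2 - (x + (if PySem.Int.mod size 2 = 0 then (2:Int) else 1) - 1))
          ++ PySem.List.pyRepeat ['1'] (2 * x + (if PySem.Int.mod size 2 = 0 then (2:Int) else 1))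
          ++ PySem.List.pyRepeat ['0'] (Int.tdiv size 2 - (x + (if PySem.Int.mod size 2 = 0 then (2:Int) else 1) - 1))
          ++ ['\n'])
      = fun (acc : List Char) x =>
        acc ++ (PySem.List.pyRepeat ['0'] (Int.tdiv size 2 - (x + (if PySem.Int.mod size 2 = 0 then (2:Int) else 1) - 1))
          ++ PySem.List.pyRepeat ['1'] (2 * x + (if PySem.Int.mod size 2 = 0 then (2:Int) else 1))
          ++ PySem.List.pyRepeat ['0'] (Int.tdiv size 2 - (x + (if PySem.Int.mod size 2 = 0 then (2:Int) else 1) - 1))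
          ++ ['\n']) := by
    funext acc x
    simp [List.append_assoc]
  rw [hb, PySem.List.foldl_append_eq_flatMap, List.nil_append, List.flatMap_assoc,
    ← List.flatMap_def]
  congr 1
  funext x
  simpa [List.append_assoc] using spc_row
    (Int.tdiv size 2 - (x + (if PySem.Int.mod size 2 = 0 then (2:Int) else 1) - 1))
    (2 * x + (if PySem.Int.mod size 2 = 0 then (2:Int) else 1))
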